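-- pv_equiv track=rewrite | github.com/DanaSwitch/leetcode | HWod/DynamicProgramming/不含101的数200三刷.py | solve
-- ===== SOURCE A (Python) =====
-- def solve(n):
--     if n < 0: return 0
--     s = bin(n)[2:]  # 转为二进制
--     memo = {}
--
--     def dp(index, last1, last2, is_limit, is_started):
--         # 定义状态元组作为 memo 的 key
--         state = (index, last1, last2, is_limit, is_started)
--         # 遍历到最后一位
--         if index == len(s):
--             return 1
--         if state in memo:
--             return memo[state]
--         res = 0
--         upper = int(s[index]) if is_limit else 1  # 当前位能够填的最大数字
--         # 遍历每个数字可以选的数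
--         for digit in range(upper + 1):
--             # 检查是否非法：前前一位是1，前一位是0，当前位填1
--             if is_started and last2 == 1 and last1 == 0 and digit == 1:
--                 continue
--             res += dp(
--                 index + 1,
--                 digit,
--                 last1,
--                 is_limit and (digit == upper),   #  前面数字是否压着边界走的
--                 is_started or (digit == 1)  # 填过数字就一直是True
--             )
--         memo[state] = res
--         return res
--
--     return dp(0, 0, 0, True, False)  # is_limit 一开始就是True
-- ===== SOURCE B (Python) =====
-- def solve(n):
--     if n < 0:
--         return 0
--     s = bin(n)[2:]
--     L = len(s)
--     # cnt[k][(a, b)]: number of length-k bit suffixes avoiding "101", given the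
--     # previous bit a and the bit before it b (unconstrained by the bound).
--     cnt = [{(a, b): 1 for a in (0, 1) for b in (0, 1)}]
--     for k in range(1, L + 1):
--         layer = {}
--         for a in (0, 1):
--             for b in (0, 1):
--                 total = 0
--                 for d in (0, 1):
--                     if not (b == 1 and a == 0 and d == 1):
--                         total += cnt[k - 1][(d, a)]
--                 layer[(a, b)] = total
--         cnt.append(layer)
--     # one forward scan along the bound n
--     res = 0
--     a = b = 0
--     for i, ch in enumerate(s):
--         u = int(ch)
--         for d in range(u):
--             if not (b == 1 and a == 0 and d == 1):
--                 res += cnt[L - i - 1][(d, a)]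
--         if b == 1 and a == 0 and u == 1:
--             return res
--         a, b = u, a
--     return res + 1
-- ===== Notes on version B (the rewrite author's own statement) =====
-- stated objective: alternative
-- what changed: Replaces A's memoized top-down recursive digit DP over (index,last1,last2,is_limit,is_started) states by a bottom-up precomputed suffix-count table cnt[len][(last,prev)] plus a single forward scan along the bound's bits with an early return when the bound itself becomes invalid.
import Mathlib
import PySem

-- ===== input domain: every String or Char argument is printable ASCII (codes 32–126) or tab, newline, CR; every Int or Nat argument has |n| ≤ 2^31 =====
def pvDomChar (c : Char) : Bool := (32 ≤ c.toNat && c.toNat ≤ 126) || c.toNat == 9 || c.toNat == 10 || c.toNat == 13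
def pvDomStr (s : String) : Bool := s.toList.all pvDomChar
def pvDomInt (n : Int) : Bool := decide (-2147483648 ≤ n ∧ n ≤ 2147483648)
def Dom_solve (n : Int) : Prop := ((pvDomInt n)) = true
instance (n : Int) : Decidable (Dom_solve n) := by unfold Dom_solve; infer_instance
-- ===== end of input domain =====

-- B replaces A's memoized top-down digit DP by a bottom-up precomputed suffix-count
-- table plus one forward scan along the bound (objective: alternative decomposition,
-- same asymptotic cost).

-- shared helper: bin(n)[2:] for n ≥ 0, as a list of '0'/'1' characters
def pyBinBits (m : Nat) : List Char :=
  if m = 0 then [] else pyBinBits (m / 2) ++ [if m % 2 = 1 then '1' else '0']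

def pyBin (n : Int) : List Char :=
  if n = 0 then ['0'] else pyBinBits n.toNat

-- shared helper: int(ch) for ch ∈ {'0','1'} (the only chars bin produces; the
-- default 0 of getD is unreachable there)
def charDigit (c : Char) : Int := (PySem.Int.ofStr? (String.mk [c])).getD 0

-- ===== PORT A =====
-- memo key = the Python state tuple (index, last1, last2, is_limit, is_started)
abbrev AKey := Nat × Int × Int × Bool × Bool

-- A's dp: memoized recursion; the memo dict is threaded through. Python tests
-- `index == len(s)`; dp only ever reaches index ≤ len(s), so `len(s) ≤ index`
-- is the same test there (and gives termination).
def dpA (s : List Char) (index : Nat) (last1 last2 : Int) (isLimit isStarted : Bool)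
    (memo : PySem.Dict AKey Int) : Int × PySem.Dict AKey Int :=
  if h : s.length ≤ index then (1, memo)
  else
    let state : AKey := (index, last1, last2, isLimit, isStarted)
    match memo.get? state with
    | some v => (v, memo)
    | none =>
      let upper : Int := if isLimit then charDigit (s.getD index '0') else 1
      let p := (PySem.List.pyRange 0 (upper + 1) 1).foldl
        (fun (acc : Int × PySem.Dict AKey Int) digit =>
          if isStarted && (last2 == 1) && (last1 == 0) && (digit == 1) then acc
          else
            let r := dpA s (index + 1) digit last1 (isLimit && (digit == upper))
              (isStarted || (digit == 1)) acc.2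
            (acc.1 + r.1, r.2))
        (0, memo)
      (p.1, p.2.insert state p.1)
  termination_by s.length - index
  decreasing_by omega

def solve (n : Int) : Int :=
  if n < 0 then 0
  else (dpA (pyBin n) 0 0 0 true false PySem.Dict.empty).1

-- ===== PORT B =====
-- layer 0 of the table: {(a, b): 1 for a in (0, 1) for b in (0, 1)}
def layer0B : PySem.Dict (Int × Int) Int :=
  [(0 : Int), 1].foldl
    (fun d a => [(0 : Int), 1].foldl (fun d b => d.insert (a, b) 1) d)
    PySem.Dict.empty

-- the table-building loop: for k in range(1, L+1) append the next layer
def buildCntB (L : Nat) : List (PySem.Dict (Int × Int) Int) :=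
  (PySem.List.pyRange 1 ((L : Int) + 1) 1).foldl
    (fun cnt k =>
      let layer := [(0 : Int), 1].foldl
        (fun layer a => [(0 : Int), 1].foldl
          (fun layer b =>
            let total := [(0 : Int), 1].foldl
              (fun total d =>
                if !((b == 1) && (a == 0) && (d == 1)) then
                  total + (PySem.List.pyGetD cnt (k - 1) PySem.Dict.empty).getD (d, a) 0
                else total)
              0
            layer.insert (a, b) total)
          layer)
        PySem.Dict.empty
      cnt ++ [layer])
    [layer0B]

-- the forward scan (the Python for-loop with its early return)
def scanB (cnt : List (PySem.Dict (Int × Int) Int)) (L : Nat) :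
    List Char → Nat → Int → Int → Int → Int
  | [], _, _, _, res => res + 1
  | ch :: rest, i, a, b, res =>
      let u : Int := charDigit ch
      let res := (PySem.List.pyRange 0 u 1).foldl
        (fun res d =>
          if !((b == 1) && (a == 0) && (d == 1)) then
            res + (PySem.List.pyGetD cnt ((L : Int) - (i : Int) - 1) PySem.Dict.empty).getD (d, a) 0
          else res)
        res
      if (b == 1) && (a == 0) && (u == 1) then res
      else scanB cnt L rest (i + 1) u a res

def solve_alt (n : Int) : Int :=
  if n < 0 then 0
  else
    let s := pyBin n
    let L := s.length
    scanB (buildCntB L) L s 0 0 0 0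

-- ===== PRECONDITION & SPEC =====
def Spec_solve (n : Int) (out : Int) : Prop := out = solve_alt n
instance (n : Int) (out : Int) : Decidable (Spec_solve n out) := by unfold Spec_solve; infer_instance

-- ===== CLAIM (what is proved, stated in full; the proofs are below) =====
def Claim_equal_solve : Prop := ∀ (n : Int), Dom_solve n → Spec_solve n (solve n)

-- ===== LEMMAS AND PROOFS =====

-- pure (memo-free) version of A's dp
def dpP (s : List Char) (index : Nat) (a b : Int) (lim st : Bool) : Int :=
  if h : s.length ≤ index then 1
  else
    let upper : Int := if lim then charDigit (s.getD index '0') else 1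
    (PySem.List.pyRange 0 (upper + 1) 1).foldl
      (fun res d =>
        if st && (b == 1) && (a == 0) && (d == 1) then res
        else res + dpP s (index + 1) d a (lim && (d == upper)) (st || (d == 1)))
      0
  termination_by s.length - index
  decreasing_by omega

-- dpP with the is_started flag eliminated (legal on reachable states)
def dpN (s : List Char) (index : Nat) (a b : Int) (lim : Bool) : Int :=
  if h : s.length ≤ index then 1
  else
    let upper : Int := if lim then charDigit (s.getD index '0') else 1
    (PySem.List.pyRange 0 (upper + 1) 1).foldl
      (fun res d =>
        if (b == 1) && (a == 0) && (d == 1) then res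
        else res + dpN s (index + 1) d a (lim && (d == upper)))
      0
  termination_by s.length - index
  decreasing_by omega

-- the closed recurrence behind B's table
def cntP : Nat → Int → Int → Int
  | 0, _, _ => 1
  | k + 1, a, b => cntP k 0 a + (if (b == 1) && (a == 0) then 0 else cntP k 1 a)

def Bits (s : List Char) : Prop := ∀ c ∈ s, c = '0' ∨ c = '1'

def GoodMemo (s : List Char) (memo : PySem.Dict AKey Int) : Prop :=
  ∀ i a b lim st v, memo.get? (i, a, b, lim, st) = some v → v = dpP s i a b lim st

theorem bits_pyBinBits (m : Nat) : Bits (pyBinBits m) := by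
  intro c hc
  induction m using Nat.strong_induction_on with
  | _ m ih =>
    rw [pyBinBits] at hc
    split at hc
    · simp at hc
    · rcases List.mem_append.mp hc with h | h
      · exact ih (m / 2) (Nat.div_lt_self (by omega) (by omega)) h
      · simp at h; subst h; split <;> simp

theorem bits_pyBin (n : Int) : Bits (pyBin n) := by
  rw [pyBin]; split
  · intro c hc; simp at hc; subst hc; simp
  · exact fun c hc => bits_pyBinBits n.toNat c hc

theorem charDigit_cases {s : List Char} (hs : Bits s) {i : Nat} (hi : i < s.length) :
    charDigit (s.getD i '0') = 0 ∨ charDigit (s.getD i '0') = 1 := by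
  have hmem : s.getD i '0' ∈ s := by
    rw [List.getD_eq_getElem?_getD, List.getElem?_eq_getElem hi]
    exact List.getElem_mem hi
  rcases hs _ hmem with h | h <;> rw [h] <;> [left; right] <;> decide

theorem range01 : PySem.List.pyRange 0 (0 + 1) 1 = [0] ∧ PySem.List.pyRange 0 (1 + 1) 1 = [0, 1] := by
  decide

theorem good_insert {s : List Char} {memo : PySem.Dict AKey Int}
    (hm : GoodMemo s memo) {i : Nat} {a b : Int} {lim st : Bool} {v : Int}
    (hv : v = dpP s i a b lim st) :
    GoodMemo s (memo.insert (i, a, b, lim, st) v) := by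
  intro i' a' b' lim' st' v' hg
  by_cases hk : ((i', a', b', lim', st') : AKey) = (i, a, b, lim, st)
  · simp only [Prod.mk.injEq] at hk
    obtain ⟨rfl, rfl, rfl, rfl, rfl⟩ := hk
    rw [PySem.Dict.get?_insert_self] at hg
    cases hg; exact hv
  · rw [PySem.Dict.get?_insert_of_ne _ _ hk] at hg
    exact hm _ _ _ _ _ _ hg

-- memo correctness: A's dp computes dpP and keeps the memo truthful
theorem dpA_correct (s : List Char) (hs : Bits s) :
    ∀ fuel index a b lim st memo, s.length - index ≤ fuel → GoodMemo s memo →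
      (dpA s index a b lim st memo).1 = dpP s index a b lim st ∧
      GoodMemo s (dpA s index a b lim st memo).2 := by
  intro fuel
  induction fuel with
  | zero =>
    intro index a b lim st memo hf hm
    have hle : s.length ≤ index := by omega
    rw [dpA, dpP]
    simp [hle, hm]
  | succ fuel ih =>
    intro index a b lim st memo hf hm
    by_cases hle : s.length ≤ index
    · rw [dpA, dpP]; simp [hle, hm]
    · rw [dpA]
      simp only [hle, dite_false]
      cases hget : memo.get? (index, a, b, lim, st) with
      | some v =>
        simp only [hget]
        exact ⟨hm _ _ _ _ _ _ hget, hm⟩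
      | none =>
        simp only [hget]
        have hidx : index < s.length := by omega
        have hfu : s.length - (index + 1) ≤ fuel := by omega
        have hup : (if lim = true then charDigit (s.getD index '0') else 1) = 0 ∨
            (if lim = true then charDigit (s.getD index '0') else 1) = 1 := by
          split
          · exact charDigit_cases hs hidx
          · right; rfl
        rcases hup with h0 | h1
        · -- digits = [0]
          rw [h0, range01.1]
          simp only [List.foldl]
          have hc : (st && (b == 1) && (a == 0) && ((0 : Int) == 1)) = false := by
            simp
          rw [hc]
          simp only [Bool.false_eq_true, if_false]
          have hr := ih (index + 1) 0 a (lim && ((0 : Int) == (0 : Int)))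
            (st || ((0 : Int) == 1)) memo hfu hm
          have hfst : (0 : Int) + (dpA s (index + 1) 0 a (lim && ((0 : Int) == (0 : Int)))
              (st || ((0 : Int) == 1)) memo).1 = dpP s index a b lim st := by
            rw [dpP]
            simp only [hle, dite_false]
            rw [h0, range01.1]
            simp only [List.foldl, hc, Bool.false_eq_true, if_false]
            rw [hr.1]
          exact ⟨hfst, good_insert hr.2 hfst⟩
        · -- digits = [0, 1]
          rw [h1, range01.2]
          simp only [List.foldl]
          have hc0 : (st && (b == 1) && (a == 0) && ((0 : Int) == 1)) = false := by simp
          rw [hc0]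
          simp only [Bool.false_eq_true, if_false]
          have hr0 := ih (index + 1) 0 a (lim && ((0 : Int) == (1 : Int)))
            (st || ((0 : Int) == 1)) memo hfu hm
          cases hc1 : (st && (b == 1) && (a == 0) && ((1 : Int) == 1)) with
          | true =>
            simp only [if_true]
            have hfst : (0 : Int) + (dpA s (index + 1) 0 a (lim && ((0 : Int) == (1 : Int)))
                (st || ((0 : Int) == 1)) memo).1 = dpP s index a b lim st := by
              rw [dpP]
              simp only [hle, dite_false]
              rw [h1, range01.2]
              simp only [List.foldl, hc0, hc1, Bool.false_eq_true, if_false, if_true]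
              rw [hr0.1]
            exact ⟨hfst, good_insert hr0.2 hfst⟩
          | false =>
            simp only [Bool.false_eq_true, if_false]
            have hr1 := ih (index + 1) 1 a (lim && ((1 : Int) == (1 : Int)))
              (st || ((1 : Int) == 1))
              (dpA s (index + 1) 0 a (lim && ((0 : Int) == (1 : Int)))
                (st || ((0 : Int) == 1)) memo).2 hfu hr0.2
            have hfst : (0 : Int) + (dpA s (index + 1) 0 a (lim && ((0 : Int) == (1 : Int)))
                (st || ((0 : Int) == 1)) memo).1 +
                (dpA s (index + 1) 1 a (lim && ((1 : Int) == (1 : Int)))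
                  (st || ((1 : Int) == 1))
                  (dpA s (index + 1) 0 a (lim && ((0 : Int) == (1 : Int)))
                    (st || ((0 : Int) == 1)) memo).2).1 = dpP s index a b lim st := by
              rw [dpP]
              simp only [hle, dite_false]
              rw [h1, range01.2]
              simp only [List.foldl, hc0, hc1, Bool.false_eq_true, if_false]
              rw [hr0.1, hr1.1]
            exact ⟨hfst, good_insert hr1.2 hfst⟩

-- on reachable states (any previous 1 forces is_started) dpP ignores is_started
theorem dpP_eq_dpN (s : List Char) (hs : Bits s) :
    ∀ fuel index a b lim st, s.length - index ≤ fuel →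
      (a = 1 → st = true) → (b = 1 → st = true) →
      dpP s index a b lim st = dpN s index a b lim := by
  intro fuel
  induction fuel with
  | zero =>
    intro index a b lim st hf _ _
    have hle : s.length ≤ index := by omega
    rw [dpP, dpN]; simp [hle]
  | succ fuel ih =>
    intro index a b lim st hf ha hb
    by_cases hle : s.length ≤ index
    · rw [dpP, dpN]; simp [hle]
    · rw [dpP, dpN]
      simp only [hle, dite_false]
      have hidx : index < s.length := by omega
      have hfu : s.length - (index + 1) ≤ fuel := by omega
      have hcond : ∀ d : Int, (st && (b == 1) && (a == 0) && (d == 1)) =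
          ((b == 1) && (a == 0) && (d == 1)) := by
        intro d
        by_cases hb1 : b = 1
        · rw [hb hb1]; simp
        · have : (b == 1) = false := by simp [hb1]
          simp [this]
      have hup : (if lim = true then charDigit (s.getD index '0') else 1) = 0 ∨
          (if lim = true then charDigit (s.getD index '0') else 1) = 1 := by
        split
        · exact charDigit_cases hs hidx
        · right; rfl
      rcases hup with h0 | h1
      · rw [h0, range01.1]
        simp only [List.foldl, hcond]
        rw [ih (index + 1) 0 a (lim && ((0 : Int) == (0 : Int))) (st || ((0 : Int) == 1)) hfu
          (by intro h; exact absurd h (by norm_num))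
          (by intro h; rw [ha h]; simp)]
      · rw [h1, range01.2]
        simp only [List.foldl, hcond]
        rw [ih (index + 1) 0 a (lim && ((0 : Int) == (1 : Int))) (st || ((0 : Int) == 1)) hfu
          (by intro h; exact absurd h (by norm_num))
          (by intro h; rw [ha h]; simp)]
        rw [ih (index + 1) 1 a (lim && ((1 : Int) == (1 : Int))) (st || ((1 : Int) == 1)) hfu
          (by intro _; simp)
          (by intro h; rw [ha h]; simp)]

-- without the limit, dpN depends on s only through the remaining length: the table
theorem dpN_false_eq_cntP (s : List Char) :
    ∀ fuel index a b, s.length - index ≤ fuel →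
      dpN s index a b false = cntP (s.length - index) a b := by
  intro fuel
  induction fuel with
  | zero =>
    intro index a b hf
    have hle : s.length ≤ index := by omega
    rw [dpN]
    have : s.length - index = 0 := by omega
    simp [hle, this, cntP]
  | succ fuel ih =>
    intro index a b hf
    by_cases hle : s.length ≤ index
    · rw [dpN]
      have : s.length - index = 0 := by omega
      simp [hle, this, cntP]
    · rw [dpN]
      simp only [hle, dif_neg, not_false_iff, dite_false, if_false, Bool.false_eq_true]
      rw [range01.2]
      simp only [List.foldl]
      have hc0 : ((b == 1) && (a == 0) && ((0 : Int) == 1)) = false := by simp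
      rw [hc0]
      have hfu : s.length - (index + 1) ≤ fuel := by omega
      have hk : s.length - index = (s.length - (index + 1)) + 1 := by omega
      rw [hk, cntP]
      simp only [Bool.false_eq_true, if_false, Bool.false_and, zero_add]
      rw [ih (index + 1) 0 a hfu]
      by_cases hba : b = 1 ∧ a = 0
      · have : ((b == 1) && (a == 0) && ((1 : Int) == 1)) = true := by
          simp [hba.1, hba.2]
        have h2 : ((b == 1) && (a == 0)) = true := by simp [hba.1, hba.2]
        rw [this, h2]
        simp
      · have : ((b == 1) && (a == 0)) = false := by
          rcases not_and_or.mp hba with h | h <;> simp [h] <;> tauto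
        rw [this]
        simp only [Bool.false_and, Bool.false_eq_true, if_false]
        rw [ih (index + 1) 1 a hfu]

-- one table-building step appends one layer
theorem buildCntB_succ (L : Nat) :
    buildCntB (L + 1) = buildCntB L ++
      [[(0 : Int), 1].foldl
        (fun layer a => [(0 : Int), 1].foldl
          (fun layer b =>
            layer.insert (a, b)
              ([(0 : Int), 1].foldl
                (fun total d =>
                  if !((b == 1) && (a == 0) && (d == 1)) then
                    total + (PySem.List.pyGetD (buildCntB L) (((L : Int) + 1) - 1)
                      PySem.Dict.empty).getD (d, a) 0
                  else total)
                0))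
          layer)
        PySem.Dict.empty] := by
  rw [buildCntB]
  rw [buildCntB]
  have hcast : ((L + 1 : Nat) : Int) + 1 = ((L : Int) + 1) + 1 := by push_cast; ring
  rw [hcast, PySem.List.pyRange_one_succ_right (by omega), List.foldl_append]
  rfl

-- B's table is correct: entry k of buildCntB L holds cntP k
theorem buildCntB_spec (L : Nat) :
    (buildCntB L).length = L + 1 ∧
    ∀ k, k ≤ L → ∀ d a : Int, (d = 0 ∨ d = 1) → (a = 0 ∨ a = 1) →
      (PySem.List.pyGetD (buildCntB L) (k : Int) PySem.Dict.empty).getD (d, a) 0 = cntP k d a := by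
  induction L with
  | zero =>
    constructor
    · decide
    · intro k hk d a hd ha
      have : k = 0 := by omega
      subst this
      rcases hd with rfl | rfl <;> rcases ha with rfl | rfl <;> decide
  | succ L ih =>
    have hg : ∀ d a : Int, (d = 0 ∨ d = 1) → (a = 0 ∨ a = 1) →
        ((buildCntB L)[L]?.getD PySem.Dict.empty).getD (d, a) 0 = cntP L d a := by
      intro d a hd ha
      have h := ih.2 L le_rfl d a hd ha
      rw [PySem.List.pyGetD_natCast, List.getD_eq_getElem?_getD] at h
      exact h
    obtain ⟨layer, hB, hlay⟩ : ∃ layer : PySem.Dict (Int × Int) Int,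
        buildCntB (L + 1) = buildCntB L ++ [layer] ∧
        ∀ d a : Int, (d = 0 ∨ d = 1) → (a = 0 ∨ a = 1) →
          layer.getD (d, a) 0 = cntP (L + 1) d a := by
      refine ⟨_, buildCntB_succ L, ?_⟩
      intro d a hd ha
      rcases hd with rfl | rfl <;> rcases ha with rfl | rfl <;>
        simp [List.foldl, cntP, PySem.Dict.getD_insert,
          hg 0 0 (by norm_num) (by norm_num), hg 1 0 (by norm_num) (by norm_num),
          hg 0 1 (by norm_num) (by norm_num), hg 1 1 (by norm_num) (by norm_num)]
    rw [hB]
    constructor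
    · simp [ih.1]
    · intro k hk d a hd ha
      rw [PySem.List.pyGetD_natCast]
      by_cases hkL : k ≤ L
      · have hlt : k < (buildCntB L).length := by omega
        rw [List.getD_append _ _ _ _ hlt]
        have := ih.2 k hkL d a hd ha
        rw [PySem.List.pyGetD_natCast] at this
        exact this
      · have hkeq : k = L + 1 := by omega
        subst hkeq
        have hlen : (buildCntB L).length = L + 1 := ih.1
        have hidx : (buildCntB L ++ [layer]).getD (L + 1) PySem.Dict.empty = layer := by
          rw [List.getD_eq_getElem?_getD]
          rw [List.getElem?_append_right (by omega)]
          simp [hlen]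
        rw [hidx]
        exact hlay d a hd ha

-- the forward scan accumulates exactly dpN along the bound
theorem scanB_spec (s : List Char) (hs : Bits s) :
    ∀ rest i a b res, rest = List.drop i s → (a = 0 ∨ a = 1) →
      scanB (buildCntB s.length) s.length rest i a b res = res + dpN s i a b true := by
  intro rest
  induction rest with
  | nil =>
    intro i a b res hdrop ha
    have hle : s.length ≤ i := by
      by_contra h
      have : s.drop i ≠ [] := by
        apply List.ne_nil_of_length_pos
        rw [List.length_drop]; omega
      exact this hdrop.symm
    rw [scanB, dpN]
    simp [hle]
  | cons ch rest ihr =>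
    intro i a b res hdrop ha
    have hlt : i < s.length := by
      by_contra h
      rw [List.drop_eq_nil_of_le (by omega)] at hdrop
      exact List.cons_ne_nil _ _ hdrop
    have hch : ch = s.getD i '0' := by
      have h1 : s.drop i = s[i] :: s.drop (i + 1) := by
        rw [List.drop_eq_getElem_cons hlt]
      rw [h1] at hdrop
      have := (List.cons.injEq _ _ _ _).mp hdrop.symm
      rw [this.1.symm, List.getD_eq_getElem?_getD, List.getElem?_eq_getElem hlt]
      rfl
    have hrest : rest = List.drop (i + 1) s := by
      have h1 : s.drop i = s[i] :: s.drop (i + 1) := by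
        rw [List.drop_eq_getElem_cons hlt]
      rw [h1] at hdrop
      exact ((List.cons.injEq _ _ _ _).mp hdrop.symm).2.symm
    have hu : charDigit ch = 0 ∨ charDigit ch = 1 := by
      rw [hch]; exact charDigit_cases hs hlt
    have hfuel := dpN_false_eq_cntP s
    have hcnt := buildCntB_spec s.length
    have hLi : ((s.length : Int) - (i : Int) - 1) = (((s.length - (i + 1) : Nat)) : Int) := by
      push_cast [Nat.cast_sub (by omega : i + 1 ≤ s.length)]; ring
    rw [scanB, dpN]
    simp only [hlt.not_ge, dite_false, eq_self_iff_true, if_true]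
    rw [hch] at hu ⊢
    rcases hu with h0 | h1
    · -- bound digit 0: inner loop empty, continue along the bound
      rw [h0]
      have hr0 : PySem.List.pyRange 0 0 1 = ([] : List Int) := by decide
      rw [hr0]
      simp only [List.foldl]
      have hcond : ((b == 1) && (a == 0) && ((0 : Int) == 1)) = false := by simp
      rw [hcond]
      simp only [Bool.false_eq_true, if_false]
      rw [ihr (i + 1) 0 a res hrest (by norm_num)]
      rw [range01.1]
      simp only [List.foldl, hcond, Bool.false_eq_true, if_false]
      have htrue : (true && ((0 : Int) == (0 : Int))) = true := by simp
      rw [htrue]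
      ring
    · -- bound digit 1
      rw [h1]
      have hr1 : PySem.List.pyRange 0 1 1 = [(0 : Int)] := by decide
      rw [hr1, range01.2]
      simp only [List.foldl]
      have hc0 : ((b == 1) && (a == 0) && ((0 : Int) == 1)) = false := by simp
      rw [hc0]
      simp only [Bool.not_false, if_true, Bool.false_eq_true, if_false]
      have hfalse : (true && ((0 : Int) == (1 : Int))) = false := by simp
      have htrue1 : (true && ((1 : Int) == (1 : Int))) = true := by simp
      rw [hfalse, htrue1]
      -- the table entry added by the inner loop is dpN with the limit dropped
      have htab : (PySem.List.pyGetD (buildCntB s.length)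
          ((s.length : Int) - (i : Int) - 1) PySem.Dict.empty).getD (0, a) 0
          = dpN s (i + 1) 0 a false := by
        rw [hLi, hcnt.2 (s.length - (i + 1)) (by omega) 0 a (by norm_num) ha,
          hfuel (s.length - (i + 1)) (i + 1) 0 a (by omega)]
      cases hc1 : ((b == 1) && (a == 0) && ((1 : Int) == 1)) with
      | true =>
        -- early return; dpN keeps only the d = 0 term
        simp only [Bool.not_true, Bool.false_eq_true, if_false, if_true]
        rw [htab]
        ring
      | false =>
        simp only [Bool.not_false, if_true, Bool.false_eq_true, if_false]
        rw [ihr (i + 1) 1 a _ hrest (by norm_num)]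
        rw [htab]
        ring

theorem solve_eq (n : Int) : solve n = solve_alt n := by
  rw [solve, solve_alt]
  by_cases hneg : n < 0
  · simp [hneg]
  · simp only [hneg, if_false]
    have hs := bits_pyBin n
    have h1 := dpA_correct (pyBin n) hs ((pyBin n).length) 0 0 0 true false
      PySem.Dict.empty (by omega) (by intro i a b lim st v hg; simp [PySem.Dict.get?_empty] at hg)
    have h2 := dpP_eq_dpN (pyBin n) hs ((pyBin n).length) 0 0 0 true false (by omega)
      (by intro h; exact absurd h (by norm_num)) (by intro h; exact absurd h (by norm_num))
    have h3 := scanB_spec (pyBin n) hs (pyBin n) 0 0 0 0 (by simp) (by norm_num)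
    rw [h1.1, h2, h3]
    ring

-- ===== VERDICT (by name: the statement is the Claim_ definition above) =====
theorem solve_spec : Claim_equal_solve := by
  intro n _
  unfold Spec_solve
  exact solve_eq n
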